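-- pv_equiv track=rewrite | github.com/VerVan91/AUTOTEST-Steam | Utils/Utils.py | searching_equal_games
-- ===== SOURCE A (Python) =====
-- def searching_equal_games(list_of_names, first_game, second_game):
--     first_game_num = second_game_num = 0
--     for i, j in enumerate(list_of_names):
--         if first_game == j:
--             first_game_num = i
--         if second_game == j:
--             second_game_num = i
--     return first_game_num, second_game_num
-- ===== SOURCE B (Python) =====
-- def searching_equal_games(list_of_names, first_game, second_game):
--     def last_index(name):
--         try:
--             return len(list_of_names) - 1 - list_of_names[::-1].index(name)
--         except ValueError:
--             return 0
--     return last_index(first_game), last_index(second_game)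
-- ===== Notes on version B (the rewrite author's own statement) =====
-- stated objective: alternative
-- what changed: Instead of one forward pass carrying two running last-match indices, B answers each query independently by reversing the list and taking the FIRST match from the end (len-1-reversed.index(name)), falling back to 0 when the name is absent.
import Mathlib
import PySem

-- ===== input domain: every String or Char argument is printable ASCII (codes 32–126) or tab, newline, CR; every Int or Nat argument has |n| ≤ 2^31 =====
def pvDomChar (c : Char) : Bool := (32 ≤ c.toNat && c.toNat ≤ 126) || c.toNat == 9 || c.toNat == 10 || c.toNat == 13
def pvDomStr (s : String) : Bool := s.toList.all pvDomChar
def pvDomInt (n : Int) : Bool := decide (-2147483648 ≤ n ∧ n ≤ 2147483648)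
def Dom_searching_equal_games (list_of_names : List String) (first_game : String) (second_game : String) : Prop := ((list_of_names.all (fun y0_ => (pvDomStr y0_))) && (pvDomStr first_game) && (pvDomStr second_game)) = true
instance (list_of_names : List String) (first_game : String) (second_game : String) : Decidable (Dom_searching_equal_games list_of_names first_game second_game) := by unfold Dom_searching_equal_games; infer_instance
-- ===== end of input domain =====

-- B replaces A's single forward pass with two running last-match indices by an independent
-- per-query search: reverse the list and take the FIRST match from the end, defaulting to 0
-- when the name is absent (objective: alternative; same cost).

-- ===== PORT A =====
def searching_equal_games (list_of_names : List String) (first_game : String) (second_game : String) : Int × Int :=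
  (PySem.List.enumerate list_of_names 0).foldl
    (fun acc p =>
      let acc := if first_game == p.2 then (p.1, acc.2) else acc
      let acc := if second_game == p.2 then (acc.1, p.1) else acc
      acc)
    (0, 0)

-- ===== PORT B =====
-- last_index: len(list_of_names) - 1 - list_of_names[::-1].index(name); ValueError → 0.
def sq_last_index (list_of_names : List String) (name : String) : Int :=
  match PySem.List.index? list_of_names.reverse name with
  | some j => (list_of_names.length : Int) - 1 - (j : Int)
  | none => 0

def searching_equal_games_alt (list_of_names : List String) (first_game : String) (second_game : String) : Int × Int :=
  (sq_last_index list_of_names first_game, sq_last_index list_of_names second_game)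

-- ===== PRECONDITION & SPEC =====
def Spec_searching_equal_games (list_of_names : List String) (first_game : String) (second_game : String) (out : Int × Int) : Prop := out = searching_equal_games_alt list_of_names first_game second_game
instance (list_of_names : List String) (first_game : String) (second_game : String) (out : Int × Int) : Decidable (Spec_searching_equal_games list_of_names first_game second_game out) := by unfold Spec_searching_equal_games; infer_instance

-- ===== CLAIM (what is proved, stated in full; the proofs are below) =====
def Claim_equal_searching_equal_games : Prop := ∀ (list_of_names : List String) (first_game : String) (second_game : String), Dom_searching_equal_games list_of_names first_game second_game → Spec_searching_equal_games list_of_names first_game second_game (searching_equal_games list_of_names first_game second_game)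

-- ===== LEMMAS AND PROOFS =====

-- The "last index with default" function B computes, generalized over start offset and default.
def sq_g (xs : List String) (name : String) (n a : Int) : Int :=
  match PySem.List.index? xs.reverse name with
  | some j => n + (xs.length : Int) - 1 - (j : Int)
  | none => a

-- Peeling one element off the front of the list shifts the start and absorbs a hit into the default.
theorem sq_g_cons (x : String) (xs : List String) (name : String) (n a : Int) :
    sq_g (x :: xs) name n a = sq_g xs name (n + 1) (if name = x then n else a) := by
  unfold sq_g
  by_cases hmem : name ∈ xs
  · have h1 : PySem.List.index? (x :: xs).reverse name = PySem.List.index? xs.reverse name := by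
      have : (x :: xs).reverse = xs.reverse ++ [x] := by simp
      rw [this, PySem.List.index?_append_of_mem _ (by simpa using hmem)]
    rw [h1]
    rcases h2 : PySem.List.index? xs.reverse name with _ | j
    · rw [PySem.List.index?_eq_none_iff] at h2; simp at h2; exact absurd hmem h2
    · simp; omega
  · by_cases hx : name = x
    · have h1 : PySem.List.index? (x :: xs).reverse name = some xs.reverse.length := by
        have hr : (x :: xs).reverse = xs.reverse ++ [name] := by simp [hx]
        rw [hr, PySem.List.index?_append_singleton_self _ _ (by simpa using hmem)]
      have h2 : PySem.List.index? xs.reverse name = none := by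
        rw [PySem.List.index?_eq_none_iff]; simpa using hmem
      rw [h1, h2]; simp [hx]; omega
    · have h1 : PySem.List.index? (x :: xs).reverse name = none := by
        rw [PySem.List.index?_eq_none_iff]; simp [hmem, hx]
      have h2 : PySem.List.index? xs.reverse name = none := by
        rw [PySem.List.index?_eq_none_iff]; simpa using hmem
      rw [h1, h2]; simp [hx]

-- Main invariant: A's fold from (aF, aS) with indices starting at n is B's reversed-search
-- value with defaults aF, aS.
theorem fold_eq_sq_g (xs : List String) (f s : String) (n aF aS : Int) :
    ((PySem.List.enumerate xs n).foldl
      (fun acc p =>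
        let acc := if f == p.2 then (p.1, acc.2) else acc
        let acc := if s == p.2 then (acc.1, p.1) else acc
        acc) (aF, aS))
      = (sq_g xs f n aF, sq_g xs s n aS) := by
  induction xs generalizing n aF aS with
  | nil => simp [sq_g]
  | cons x xs ih =>
    rw [PySem.List.enumerate_cons, List.foldl_cons]
    have hstep :
        (if (s == x) = true then ((if (f == x) = true then (n, aS) else (aF, aS)).1, n)
         else if (f == x) = true then (n, aS) else (aF, aS))
          = ((if f = x then n else aF), (if s = x then n else aS)) := by
      simp only [beq_iff_eq]; split_ifs <;> rfl
    simp only []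
    rw [hstep, ih, sq_g_cons, sq_g_cons]

-- ===== VERDICT (by name: the statement is the Claim_ definition above) =====
theorem searching_equal_games_spec : Claim_equal_searching_equal_games := by
  intro xs f s _
  unfold Spec_searching_equal_games searching_equal_games searching_equal_games_alt
  rw [fold_eq_sq_g]
  have h : ∀ name, sq_g xs name 0 0 = sq_last_index xs name := by
    intro name; unfold sq_g sq_last_index
    rcases PySem.List.index? xs.reverse name with _ | j <;> simp
  rw [h, h]
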